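-- pv_equiv track=rewrite | github.com/iris4865/algorithm-study-group-using-programmers | 04. 모의고사/iris4865.py | solution
-- ===== SOURCE A (Python) =====
-- def solution(answers):
--     solve = [
--         [1, 2, 3, 4, 5],
--         [2, 1, 2, 3, 2, 4, 2, 5],
--         [3, 3, 1, 1, 2, 2, 4, 4, 5, 5]
--     ]
--     score = [0, 0, 0]
--
--     for number, answer in enumerate(answers):
--         for i, s in enumerate(solve):
--             if answer == s[number % len(s)]: # 정답과 찍기가 같은경우
--                 score[i] += 1
--
--     return [i + 1 for i, s in enumerate(score) if s == max(score)]
-- ===== SOURCE B (Python) =====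
-- def solution(answers):
--     patterns = [
--         [1, 2, 3, 4, 5],
--         [2, 1, 2, 3, 2, 4, 2, 5],
--         [3, 3, 1, 1, 2, 2, 4, 4, 5, 5],
--     ]
--     scores = []
--     for p in patterns:
--         count = 0
--         rem = []  # remaining suffix of the current cycle of p
--         for a in answers:
--             if not rem:
--                 rem = list(p)  # refill the cycle
--             if a == rem.pop(0):
--                 count += 1
--         scores.append(count)
--     best = max(scores)
--     return [i + 1 for i, s in enumerate(scores) if s == best]
-- ===== Notes on version B (the rewrite author's own statement) =====
-- stated objective: alternative
-- what changed: One interleaved loop over enumerate(answers) testing all three patterns via s[number % len(s)] is replaced by an independent pass per pattern that consumes a remaining-suffix list of the pattern and refills it when exhausted, eliminating enumerate and modular indexing entirely.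
import Mathlib
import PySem

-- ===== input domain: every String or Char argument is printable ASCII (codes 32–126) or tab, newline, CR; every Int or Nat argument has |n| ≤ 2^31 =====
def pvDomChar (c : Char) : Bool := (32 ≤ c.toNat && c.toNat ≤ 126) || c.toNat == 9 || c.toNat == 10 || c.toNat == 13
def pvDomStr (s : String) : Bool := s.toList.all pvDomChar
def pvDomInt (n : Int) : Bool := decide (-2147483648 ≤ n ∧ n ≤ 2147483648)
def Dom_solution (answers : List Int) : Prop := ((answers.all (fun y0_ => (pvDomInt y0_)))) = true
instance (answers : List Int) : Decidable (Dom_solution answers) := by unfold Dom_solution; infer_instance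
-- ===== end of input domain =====

-- B replaces A's single interleaved pass (enumerate + modular indexing into all three
-- patterns at once) with one independent pass per pattern that consumes a remaining-suffix
-- copy of the pattern and refills it when exhausted; objective: alternative (same O(n) cost).

-- ===== PORT A =====
-- literal port of A: one fold over enumerate(answers); the inner `for i, s in
-- enumerate(solve)` is a fold over the enumerated literal pattern list; `s[number % len(s)]`
-- is PySem.List.pyGetD (always in range: the index is a nonneg mod of a positive length),
-- `score[i] += 1` is PySem.List.pySetD (i is 0/1/2, in range).
def solution (answers : List Int) : List Int :=
  let solve : List (List Int) :=
    [[1, 2, 3, 4, 5], [2, 1, 2, 3, 2, 4, 2, 5], [3, 3, 1, 1, 2, 2, 4, 4, 5, 5]]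
  let score : List Int :=
    (PySem.List.enumerate answers 0).foldl (fun score na =>
      (PySem.List.enumerate solve 0).foldl (fun score is =>
        if na.2 = PySem.List.pyGetD is.2 (PySem.Int.mod na.1 (is.2.length : Int)) 0 then
          PySem.List.pySetD score is.1 (PySem.List.pyGetD score is.1 0 + 1)
        else score) score) [0, 0, 0]
  (PySem.List.enumerate score 0).filterMap (fun p =>
    if some p.2 = PySem.List.max? score (fun y => y) then some (p.1 + 1) else none)

-- ===== PORT B =====
-- one step of B's inner loop: refill `rem` from the pattern when empty, pop its head,
-- compare (`rem.pop(0)` is PySem.List.pop? …; the none branch is unreachable: p ≠ []).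
def bStep (p : List Int) (st : Int × List Int) (a : Int) : Int × List Int :=
  let rem := if st.2 = [] then p else st.2
  match PySem.List.pop? rem 0 with
  | none => st
  | some (b, rest) => (if a = b then st.1 + 1 else st.1, rest)

def solution_alt (answers : List Int) : List Int :=
  let patterns : List (List Int) :=
    [[1, 2, 3, 4, 5], [2, 1, 2, 3, 2, 4, 2, 5], [3, 3, 1, 1, 2, 2, 4, 4, 5, 5]]
  let scores : List Int := patterns.map (fun p => (answers.foldl (bStep p) (0, [])).1)
  let best := PySem.List.max? scores (fun y => y)
  (PySem.List.enumerate scores 0).filterMap (fun p =>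
    if some p.2 = best then some (p.1 + 1) else none)

-- ===== PRECONDITION & SPEC =====
def Spec_solution (answers : List Int) (out : List Int) : Prop := out = solution_alt answers
instance (answers : List Int) (out : List Int) : Decidable (Spec_solution answers out) := by unfold Spec_solution; infer_instance

-- ===== CLAIM (what is proved, stated in full; the proofs are below) =====
def Claim_equal_solution : Prop := ∀ (answers : List Int), Dom_solution answers → Spec_solution answers (solution answers)

-- ===== LEMMAS AND PROOFS =====

-- common characterisation: matches of l against pattern p starting at position k (mod |p|)
def cIdx (p : List Int) : List Int → Nat → Int
  | [], _ => 0
  | a :: t, k => (if a = p.getD (k % p.length) 0 then 1 else 0) + cIdx p t (k + 1)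

lemma cIdx_mod (p : List Int) (l : List Int) (k : Nat) :
    cIdx p l (k % p.length) = cIdx p l k := by
  induction l generalizing k with
  | nil => rfl
  | cons a t ih =>
    simp only [cIdx, Nat.mod_mod]
    have h : cIdx p t (k % p.length + 1) = cIdx p t (k + 1) := by
      rw [← ih (k % p.length + 1), Nat.mod_add_mod, ih]
    rw [h]

lemma bFold_eq (p : List Int) (hp : 1 < p.length) (l : List Int) :
    ∀ (j : Nat), j ≤ p.length → ∀ (c : Int),
      (l.foldl (bStep p) (c, p.drop j)).1 = c + cIdx p l j := by
  induction l with
  | nil => intro j _ c; simp [cIdx]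
  | cons a t ih =>
    intro j hj c
    have hcons : p = p[0]'(by omega) :: p.drop 1 := by
      conv_lhs => rw [← List.drop_zero (l := p)]
      exact List.drop_eq_getElem_cons (by omega)
    by_cases hj' : j = p.length
    · subst hj'
      have hpop : PySem.List.pop? p 0 = some (p[0]'(by omega), p.drop 1) := by
        conv_lhs => rw [hcons]
        exact PySem.List.pop?_zero_cons _ _
      have hstep : bStep p (c, p.drop p.length) a
          = (if a = p[0]'(by omega) then c + 1 else c, p.drop 1) := by
        simp [bStep, List.drop_length, hpop]
      rw [List.foldl_cons, hstep, ih 1 (by omega)]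
      have h1 : (p.length + 1) % p.length = 1 := by
        rw [Nat.add_mod_left, Nat.mod_eq_of_lt hp]
      have h2 : cIdx p t 1 = cIdx p t (p.length + 1) := by
        rw [← cIdx_mod p t (p.length + 1), h1]
      simp only [cIdx, Nat.mod_self, List.getD_eq_getElem p 0 (show 0 < p.length by omega), h2]
      split_ifs <;> ring
    · have hjlt : j < p.length := lt_of_le_of_ne hj hj'
      have hstep : bStep p (c, p.drop j) a
          = (if a = p[j]'hjlt then c + 1 else c, p.drop (j + 1)) := by
        have hne : p.drop j ≠ [] := by
          simp only [ne_eq, List.drop_eq_nil_iff]; omega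
        have hpop : PySem.List.pop? (p.drop j) 0 = some (p[j]'hjlt, p.drop (j + 1)) := by
          rw [List.drop_eq_getElem_cons hjlt]
          exact PySem.List.pop?_zero_cons _ _
        simp [bStep, hne, hpop]
      rw [List.foldl_cons, hstep, ih (j + 1) (by omega)]
      simp only [cIdx, Nat.mod_eq_of_lt hjlt, List.getD_eq_getElem p 0 hjlt]
      split_ifs <;> ring

lemma mod5 (k : Nat) : PySem.Int.mod (k : Int) 5 = ((k % 5 : Nat) : Int) := by
  exact_mod_cast PySem.Int.mod_natCast k 5
lemma mod8 (k : Nat) : PySem.Int.mod (k : Int) 8 = ((k % 8 : Nat) : Int) := by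
  exact_mod_cast PySem.Int.mod_natCast k 8
lemma mod10 (k : Nat) : PySem.Int.mod (k : Int) 10 = ((k % 10 : Nat) : Int) := by
  exact_mod_cast PySem.Int.mod_natCast k 10

lemma innerStep (m a x y z : Int) :
    (PySem.List.enumerate
      [[(1:Int), 2, 3, 4, 5], [2, 1, 2, 3, 2, 4, 2, 5], [3, 3, 1, 1, 2, 2, 4, 4, 5, 5]] 0).foldl
      (fun score is =>
        if a = PySem.List.pyGetD is.2 (PySem.Int.mod m (is.2.length : Int)) 0 then
          PySem.List.pySetD score is.1 (PySem.List.pyGetD score is.1 0 + 1)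
        else score) [x, y, z]
    = [if a = PySem.List.pyGetD [(1:Int), 2, 3, 4, 5] (PySem.Int.mod m 5) 0 then x + 1 else x,
       if a = PySem.List.pyGetD [(2:Int), 1, 2, 3, 2, 4, 2, 5] (PySem.Int.mod m 8) 0 then y + 1 else y,
       if a = PySem.List.pyGetD [(3:Int), 3, 1, 1, 2, 2, 4, 4, 5, 5] (PySem.Int.mod m 10) 0 then z + 1 else z] := by
  simp only [show PySem.List.enumerate
      [[(1:Int), 2, 3, 4, 5], [2, 1, 2, 3, 2, 4, 2, 5], [3, 3, 1, 1, 2, 2, 4, 4, 5, 5]] 0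
      = [(0, [(1:Int), 2, 3, 4, 5]), (1, [2, 1, 2, 3, 2, 4, 2, 5]),
         (2, [3, 3, 1, 1, 2, 2, 4, 4, 5, 5])] from rfl,
    List.foldl_cons, List.foldl_nil,
    show ((List.length [(1:Int), 2, 3, 4, 5] : Nat) : Int) = 5 from rfl,
    show ((List.length [(2:Int), 1, 2, 3, 2, 4, 2, 5] : Nat) : Int) = 8 from rfl,
    show ((List.length [(3:Int), 3, 1, 1, 2, 2, 4, 4, 5, 5] : Nat) : Int) = 10 from rfl]
  split_ifs <;> simp [PySem.List.pySetD, PySem.List.pySet?, PySem.List.pyGetD, PySem.List.pyIdx?]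

lemma aFold_eq (l : List Int) (k : Nat) (x y z : Int) :
    (PySem.List.enumerate l (k : Int)).foldl (fun score na =>
      (PySem.List.enumerate
        [[(1:Int), 2, 3, 4, 5], [2, 1, 2, 3, 2, 4, 2, 5], [3, 3, 1, 1, 2, 2, 4, 4, 5, 5]] 0).foldl
        (fun score is =>
          if na.2 = PySem.List.pyGetD is.2 (PySem.Int.mod na.1 (is.2.length : Int)) 0 then
            PySem.List.pySetD score is.1 (PySem.List.pyGetD score is.1 0 + 1)
          else score) score) [x, y, z]
    = [x + cIdx [1, 2, 3, 4, 5] l k,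
       y + cIdx [2, 1, 2, 3, 2, 4, 2, 5] l k,
       z + cIdx [3, 3, 1, 1, 2, 2, 4, 4, 5, 5] l k] := by
  induction l generalizing k x y z with
  | nil => simp [cIdx]
  | cons a t ih =>
    have hcast : (k : Int) + 1 = ((k + 1 : Nat) : Int) := by push_cast; ring
    rw [show PySem.List.enumerate (a :: t) (k : Int)
        = ((k : Int), a) :: PySem.List.enumerate t ((k + 1 : Nat) : Int) by
      rw [PySem.List.enumerate_cons, hcast], List.foldl_cons, innerStep, ih]
    simp only [cIdx,
      show List.length [(1:Int), 2, 3, 4, 5] = 5 from rfl,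
      show List.length [(2:Int), 1, 2, 3, 2, 4, 2, 5] = 8 from rfl,
      show List.length [(3:Int), 3, 1, 1, 2, 2, 4, 4, 5, 5] = 10 from rfl,
      mod5, mod8, mod10, PySem.List.pyGetD_natCast]
    split_ifs <;> simp [add_assoc]

-- ===== VERDICT (by name: the statement is the Claim_ definition above) =====
theorem solution_spec : Claim_equal_solution := by
  intro answers _
  unfold Spec_solution solution solution_alt
  have hA : (PySem.List.enumerate answers 0).foldl (fun score na =>
      (PySem.List.enumerate
        [[(1:Int), 2, 3, 4, 5], [2, 1, 2, 3, 2, 4, 2, 5], [3, 3, 1, 1, 2, 2, 4, 4, 5, 5]] 0).foldl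
        (fun score is =>
          if na.2 = PySem.List.pyGetD is.2 (PySem.Int.mod na.1 (is.2.length : Int)) 0 then
            PySem.List.pySetD score is.1 (PySem.List.pyGetD score is.1 0 + 1)
          else score) score) [0, 0, 0]
      = [cIdx [1, 2, 3, 4, 5] answers 0,
         cIdx [2, 1, 2, 3, 2, 4, 2, 5] answers 0,
         cIdx [3, 3, 1, 1, 2, 2, 4, 4, 5, 5] answers 0] := by
    simpa using aFold_eq answers 0 0 0 0
  have eB : ∀ (p : List Int), 1 < p.length →
      (answers.foldl (bStep p) (0, ([] : List Int))).1 = cIdx p answers 0 := by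
    intro p hp
    have h := bFold_eq p hp answers p.length (le_refl _) 0
    rw [List.drop_length] at h
    have h2 := cIdx_mod p answers p.length
    rw [Nat.mod_self] at h2
    rw [h, ← h2, zero_add]
  have e1 := eB [1, 2, 3, 4, 5] (by simp)
  have e2 := eB [2, 1, 2, 3, 2, 4, 2, 5] (by simp)
  have e3 := eB [3, 3, 1, 1, 2, 2, 4, 4, 5, 5] (by simp)
  simp only [List.map_cons, List.map_nil, hA, e1, e2, e3]
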